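-- pv_equiv track=rewrite | github.com/HyeM207/Algorithm | Heap/[Prg] 더 맵게.py | solution
-- ===== SOURCE A (Python) =====
-- import heapq
--
-- def solution(scoville, k):
--     answer = 0
--     heapq.heapify(scoville)
--     while len(scoville) > 0 :
--         if len(scoville) == 1 and scoville[0] < k :
--             return -1
--         if scoville[0] >= k :
--             return answer
--         x1 = heapq.heappop(scoville)
--         x2 = heapq.heappop(scoville)
--         heapq.heappush(scoville, x1 + (x2*2))
--         answer += 1
--     return answer
-- ===== SOURCE B (Python) =====
-- def solution(scoville, k):
--     # Return-value equivalent to the heap version; does not mutate scoville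
--     # (the original rearranges it in place via heapify/heappop).
--     s = sorted(scoville)
--     answer = 0
--     while len(s) >= 2 and s[0] < k:
--         v = s[0] + 2 * s[1]
--         s = s[2:]
--         i = 0
--         while i < len(s) and s[i] <= v:
--             i += 1
--         s.insert(i, v)
--         answer += 1
--     return -1 if s and s[0] < k else answer
-- ===== Notes on version B (the rewrite author's own statement) =====
-- stated objective: alternative
-- what changed: Replaces the binary heap with a sort-once list kept in ascending order by a linear insertion scan; each round pops the two front elements instead of heap-popping, and the loop/exit guards are folded into one combined condition with a single post-loop check.
import Mathlib
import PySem

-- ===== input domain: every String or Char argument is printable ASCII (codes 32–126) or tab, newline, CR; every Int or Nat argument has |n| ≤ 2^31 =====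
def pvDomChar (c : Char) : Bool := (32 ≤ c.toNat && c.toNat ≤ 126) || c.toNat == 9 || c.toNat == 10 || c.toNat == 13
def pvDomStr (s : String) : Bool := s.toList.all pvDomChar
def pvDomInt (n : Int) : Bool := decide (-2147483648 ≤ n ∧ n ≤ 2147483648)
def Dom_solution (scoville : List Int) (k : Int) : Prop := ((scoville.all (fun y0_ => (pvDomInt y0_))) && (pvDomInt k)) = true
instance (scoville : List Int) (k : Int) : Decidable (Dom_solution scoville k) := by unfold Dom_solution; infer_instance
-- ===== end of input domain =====

-- B replaces A's binary heap by a sort-once list kept ordered via linear insertion (alternative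
-- data structure, same return value; A rearranges its argument in place, B does not —
-- the equivalence proved here is about the return value only).


-- ===== PORT A =====
-- heapq is a library call; it is ported by its documented contract, which is exact for Int
-- elements (only the multiset of the heap and its minima affect A's result): after heapify,
-- heap[0] is the smallest element, heappop removes and returns it, heappush adds an element.
def pyHeapMin (h : List Int) : Int := (PySem.List.min? h (fun x => x)).getD 0

def pyHeapPop (h : List Int) : Int × List Int := (pyHeapMin h, h.erase (pyHeapMin h))

def pyHeapPush (h : List Int) (x : Int) : List Int := x :: h

theorem erase_min_length_lt (h : List Int) (hne : h ≠ []) :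
    (h.erase (pyHeapMin h)).length < h.length := by
  have : ∃ m, PySem.List.min? h (fun x => x) = some m := by
    cases hm : PySem.List.min? h (fun x => x) with
    | none => exact absurd ((PySem.List.min?_eq_none_iff h _).mp hm) hne
    | some m => exact ⟨m, rfl⟩
  obtain ⟨m, hm⟩ := this
  have hmem : m ∈ h := PySem.List.min?_mem hm
  have : pyHeapMin h = m := by simp [pyHeapMin, hm]
  rw [this, List.length_erase_of_mem hmem]
  have := List.length_pos_iff.mpr hne
  omega

-- the while loop of A: guards in A's order, two heappops, one heappush
def solutionLoop (scoville : List Int) (k : Int) (answer : Int) : Int :=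
  if _h0 : scoville.length > 0 then
    if scoville.length = 1 ∧ pyHeapMin scoville < k then -1
    else if pyHeapMin scoville ≥ k then answer
    else
      let p1 := pyHeapPop scoville
      let p2 := pyHeapPop p1.2
      solutionLoop (pyHeapPush p2.2 (p1.1 + p2.1 * 2)) k (answer + 1)
  else answer
termination_by scoville.length
decreasing_by
  have hne : scoville ≠ [] := List.length_pos_iff.mp _h0
  have h1 := erase_min_length_lt scoville hne
  simp only [pyHeapPush, pyHeapPop, List.length_cons]
  by_cases h2 : scoville.erase (pyHeapMin scoville) = []
  · simp [h2]; omega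
  · have := erase_min_length_lt _ h2
    omega

def solution (scoville : List Int) (k : Int) : Int := solutionLoop scoville k 0

-- ===== PORT B =====
-- the inner index scan + insert of Source B: walk past the elements ≤ v, insert v there
def insortLin (v : Int) : List Int → List Int
  | [] => [v]
  | y :: t => if y ≤ v then y :: insortLin v t else v :: y :: t

theorem length_insortLin (v : Int) (l : List Int) :
    (insortLin v l).length = l.length + 1 := by
  induction l with
  | nil => rfl
  | cons y t ih => by_cases h : y ≤ v <;> simp [insortLin, h, ih]

-- the while loop of Source B on the sorted list, with its combined guard and post-loop check
def solutionAltLoop (s : List Int) (k : Int) (answer : Int) : Int :=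
  match s with
  | [] => answer
  | [x] => if x < k then -1 else answer
  | x1 :: x2 :: rest =>
    if x1 < k then solutionAltLoop (insortLin (x1 + 2 * x2) rest) k (answer + 1)
    else answer
termination_by s.length
decreasing_by simp [length_insortLin]

def solution_alt (scoville : List Int) (k : Int) : Int :=
  solutionAltLoop (PySem.List.sorted scoville (fun x => x) false) k 0

-- ===== PRECONDITION & SPEC =====
def Spec_solution (scoville : List Int) (k : Int) (out : Int) : Prop := out = solution_alt scoville k
instance (scoville : List Int) (k : Int) (out : Int) : Decidable (Spec_solution scoville k out) := by unfold Spec_solution; infer_instance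

-- ===== CLAIM (what is proved, stated in full; the proofs are below) =====
def Claim_equal_solution : Prop := ∀ (scoville : List Int) (k : Int), Dom_solution scoville k → Spec_solution scoville k (solution scoville k)

-- ===== LEMMAS AND PROOFS =====

theorem pyHeapMin_eq_of_perm_sorted {h s : List Int} {x : Int} {t : List Int}
    (hp : h.Perm s) (hs : s = x :: t) (hsort : s.Pairwise (· ≤ ·)) : pyHeapMin h = x := by
  subst hs
  have hne : h ≠ [] := by
    intro h0; subst h0; exact absurd hp.symm.eq_nil (by simp)
  cases hm : PySem.List.min? h (fun y => y) with
  | none => exact absurd ((PySem.List.min?_eq_none_iff h _).mp hm) hne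
  | some m =>
    have hmem : m ∈ h := PySem.List.min?_mem hm
    have hmin := PySem.List.min?_isMin hm
    have hmem' : m ∈ x :: t := hp.mem_iff.mp hmem
    have hxm : x ≤ m := by
      rcases List.mem_cons.mp hmem' with h1 | h1
      · omega
      · exact (List.pairwise_cons.mp hsort).1 m h1
    have hmx : m ≤ x := hmin x (hp.mem_iff.mpr (by simp))
    simp [pyHeapMin, hm]; omega

theorem insortLin_perm (v : Int) (l : List Int) : (insortLin v l).Perm (v :: l) := by
  induction l with
  | nil => exact List.Perm.refl _
  | cons y t ih =>
    by_cases h : y ≤ v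
    · simp only [insortLin, if_pos h]
      exact ((ih.cons y).trans (List.Perm.swap v y t))
    · simp [insortLin, h]

theorem insortLin_pairwise (v : Int) (l : List Int) (hl : l.Pairwise (· ≤ ·)) :
    (insortLin v l).Pairwise (· ≤ ·) := by
  induction l with
  | nil => simp [insortLin]
  | cons y t ih =>
    obtain ⟨hy, ht⟩ := List.pairwise_cons.mp hl
    by_cases h : y ≤ v
    · simp only [insortLin, if_pos h]
      refine List.pairwise_cons.mpr ⟨?_, ih ht⟩
      intro z hz
      rcases List.mem_cons.mp ((insortLin_perm v t).mem_iff.mp hz) with h1 | h1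
      · omega
      · exact hy z h1
    · simp only [insortLin, if_neg h]
      refine List.pairwise_cons.mpr ⟨?_, hl⟩
      intro z hz
      rcases List.mem_cons.mp hz with h1 | h1
      · omega
      · have := hy z h1; omega

theorem loop_eq (n : Nat) : ∀ (h s : List Int) (k a : Int), h.length ≤ n → h.Perm s →
    s.Pairwise (· ≤ ·) → solutionLoop h k a = solutionAltLoop s k a := by
  induction n with
  | zero =>
    intro h s k a hlen hp _
    have h0 : h = [] := by
      cases h with
      | nil => rfl
      | cons x t => simp at hlen
    subst h0
    have : s = [] := hp.symm.eq_nil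
    subst this
    rw [solutionLoop]; simp [solutionAltLoop]
  | succ n ih =>
    intro h s k a hlen hp hsort
    match s with
    | [] =>
      have h0 : h = [] := hp.eq_nil
      subst h0
      rw [solutionLoop]; simp [solutionAltLoop]
    | [x] =>
      have h1 : h = [x] := List.perm_singleton.mp hp
      subst h1
      have hmin : pyHeapMin [x] = x := by simp [pyHeapMin, PySem.List.min?_id_cons]
      rw [solutionLoop]
      simp only [solutionAltLoop, List.length_cons, List.length_nil, hmin]
      by_cases hx : x < k
      · simp [hx]
      · have : x ≥ k := by omega
        simp [hx, this]
    | x1 :: x2 :: rest =>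
      have hlen2 : h.length = rest.length + 2 := by
        have := hp.length_eq; simpa using this
      have hmin1 : pyHeapMin h = x1 := pyHeapMin_eq_of_perm_sorted hp rfl hsort
      have hperm1 : (h.erase x1).Perm (x2 :: rest) := by
        have := hp.erase x1
        simpa [List.erase_cons_head] using this
      have hsort1 : (x2 :: rest).Pairwise (· ≤ ·) := (List.pairwise_cons.mp hsort).2
      have hmin2 : pyHeapMin (h.erase x1) = x2 := pyHeapMin_eq_of_perm_sorted hperm1 rfl hsort1
      have hperm2 : ((h.erase x1).erase x2).Perm rest := by
        have := hperm1.erase x2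
        simpa [List.erase_cons_head] using this
      rw [solutionLoop]
      simp only [solutionAltLoop]
      by_cases hx : x1 < k
      · have hcond1 : ¬ (h.length = 1 ∧ pyHeapMin h < k) := by
          intro ⟨hl, _⟩; omega
        have hcond2 : ¬ (pyHeapMin h ≥ k) := by rw [hmin1]; omega
        rw [dif_pos (by omega), if_neg hcond1, if_neg hcond2, if_pos hx]
        simp only [pyHeapPop, pyHeapPush, hmin1, hmin2]
        refine ih _ _ k (a + 1) ?_ ?_ ?_
        · have := hperm2.length_eq; simp [this]; omega
        · refine (List.Perm.cons _ hperm2).trans ?_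
          have heq : x1 + x2 * 2 = x1 + 2 * x2 := by ring
          rw [heq]
          exact (insortLin_perm (x1 + 2 * x2) rest).symm
        · exact insortLin_pairwise _ _ (List.pairwise_cons.mp hsort1).2
      · have hcond1 : ¬ (h.length = 1 ∧ pyHeapMin h < k) := by
          intro ⟨hl, _⟩; omega
        have hcond2 : pyHeapMin h ≥ k := by rw [hmin1]; omega
        rw [dif_pos (by omega), if_neg hcond1, if_pos hcond2, if_neg hx]

-- ===== VERDICT (by name: the statement is the Claim_ definition above) =====
theorem solution_spec : Claim_equal_solution := by
  intro scoville k _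
  unfold Spec_solution solution solution_alt
  exact loop_eq scoville.length scoville _ k 0 le_rfl
    (PySem.List.sorted_perm scoville _ false).symm
    (PySem.List.sorted_pairwise scoville _)
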